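-- pv_equiv track=rewrite | github.com/styrene-lab/omegon | scripts/extract_session_usage.py | pick_entry
-- ===== SOURCE A (Python) =====
-- def pick_entry(entries: list[str], contains: str | None, header: str | None, last: int) -> str:
--     if header:
--         matches = []
--         for entry in entries:
--             first_line = entry.splitlines()[0] if entry.splitlines() else ""
--             if header in first_line:
--                 matches.append(entry)
--         if not matches:
--             raise SystemExit(f"No journal entry header contains substring: {header!r}")
--         return matches[-1]
--     if contains:
--         matches = [entry for entry in entries if contains in entry]
--         if not matches:
--             raise SystemExit(f"No journal entry contains substring: {contains!r}")
--         return matches[-1]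
--     if not entries:
--         raise SystemExit("No journal entries found")
--     idx = max(0, len(entries) - last)
--     return entries[idx:][-1]
-- ===== SOURCE B (Python) =====
-- def pick_entry(entries: list[str], contains: str | None, header: str | None, last: int) -> str:
--     if header:
--         for entry in reversed(entries):
--             lines = entry.splitlines()
--             if header in (lines[0] if lines else ""):
--                 return entry
--         raise SystemExit(f"No journal entry header contains substring: {header!r}")
--     if contains:
--         for entry in reversed(entries):
--             if contains in entry:
--                 return entry
--         raise SystemExit(f"No journal entry contains substring: {contains!r}")
--     if not entries:
--         raise SystemExit("No journal entries found")
--     return entries[-1]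
-- ===== Notes on version B (the rewrite author's own statement) =====
-- stated objective: simpler
-- what changed: A collects every matching entry into a list per branch and returns its last element; B scans the entries in reverse and returns the first match (early exit), and the final branch returns entries[-1] directly instead of slicing with max(0, len - last).
import Mathlib
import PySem

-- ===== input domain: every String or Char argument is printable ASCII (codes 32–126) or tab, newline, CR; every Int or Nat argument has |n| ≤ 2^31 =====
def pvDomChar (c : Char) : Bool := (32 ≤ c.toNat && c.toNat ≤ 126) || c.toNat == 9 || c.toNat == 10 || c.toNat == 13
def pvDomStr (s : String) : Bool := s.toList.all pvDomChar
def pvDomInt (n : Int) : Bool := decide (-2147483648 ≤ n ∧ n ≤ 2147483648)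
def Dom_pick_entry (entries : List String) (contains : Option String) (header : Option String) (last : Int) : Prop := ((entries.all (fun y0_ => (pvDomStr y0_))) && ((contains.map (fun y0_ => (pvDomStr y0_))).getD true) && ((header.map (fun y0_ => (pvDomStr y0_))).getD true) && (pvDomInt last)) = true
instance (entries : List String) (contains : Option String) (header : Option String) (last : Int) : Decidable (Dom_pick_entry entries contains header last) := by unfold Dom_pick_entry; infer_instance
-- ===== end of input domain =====

-- B replaces A's per-branch match-collection lists with a reverse scan returning the first match,
-- and returns entries[-1] directly in the final branch (simpler decomposition, same results).


-- truthiness of a `str | None` parameter: `if header:` is true iff it is a non-empty string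
def pvTruthy (o : Option String) : Bool :=
  match o with
  | some s => !(s == "")
  | none => false

-- first line of an entry: `entry.splitlines()[0] if entry.splitlines() else ""`
def pvFirstLine (entry : String) : String :=
  match PySem.Str.splitlines entry with
  | [] => ""
  | l :: _ => l

-- ===== PORT A =====
-- where the Python raises (SystemExit / IndexError) the port returns ""; those inputs are outside Pre_
def pick_entry (entries : List String) (contains : Option String) (header : Option String) (last : Int) : String :=
  if pvTruthy header then
    -- ms = the list of entries whose first line contains the header substring
    let ms := entries.foldl
      (fun acc entry => if PySem.Str.isIn (header.getD "") (pvFirstLine entry) then acc ++ [entry] else acc) []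
    if ms = [] then ""  -- raise SystemExit(...)
    else (PySem.List.pyGet? ms (-1)).getD ""
  else if pvTruthy contains then
    -- ms = [entry for entry in entries if contains in entry]
    let ms := entries.filter (fun entry => PySem.Str.isIn (contains.getD "") entry)
    if ms = [] then ""  -- raise SystemExit(...)
    else (PySem.List.pyGet? ms (-1)).getD ""
  else if entries = [] then ""  -- raise SystemExit(...)
  else
    -- idx = max(0, len(entries) - last); entries[idx:][-1]
    (PySem.List.pyGet? (PySem.List.slice entries (some (max 0 ((entries.length : Int) - last))) none) (-1)).getD ""  -- none = IndexError

-- ===== PORT B =====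
def pick_entry_alt (entries : List String) (contains : Option String) (header : Option String) (last : Int) : String :=
  if pvTruthy header then
    match entries.reverse.find? (fun entry => PySem.Str.isIn (header.getD "") (pvFirstLine entry)) with
    | some entry => entry
    | none => ""  -- raise SystemExit(...)
  else if pvTruthy contains then
    match entries.reverse.find? (fun entry => PySem.Str.isIn (contains.getD "") entry) with
    | some entry => entry
    | none => ""  -- raise SystemExit(...)
  else
    match entries.getLast? with
    | some entry => entry
    | none => ""  -- raise SystemExit(...)

-- ===== PRECONDITION & SPEC =====
-- Pre_ excludes exactly the inputs where A raises: a header/contains branch with no matching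
-- entry (SystemExit), an empty entries list in the final branch (SystemExit), and last ≤ 0 in
-- the final branch (entries[idx:] is empty, so entries[idx:][-1] raises IndexError).
def Pre_pick_entry (entries : List String) (contains : Option String) (header : Option String) (last : Int) : Prop :=
  if pvTruthy header then
    ∃ e ∈ entries, PySem.Str.isIn (header.getD "") (pvFirstLine e) = true
  else if pvTruthy contains then
    ∃ e ∈ entries, PySem.Str.isIn (contains.getD "") e = true
  else entries ≠ [] ∧ 1 ≤ last
instance (entries : List String) (contains : Option String) (header : Option String) (last : Int) : Decidable (Pre_pick_entry entries contains header last) := by unfold Pre_pick_entry; infer_instance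

def pvWitness_pick_entry : List String × Option String × Option String × Int := (["ab\ncd", "ef"], none, some "a", 1)

def Spec_pick_entry (entries : List String) (contains : Option String) (header : Option String) (last : Int) (out : String) : Prop := out = pick_entry_alt entries contains header last
instance (entries : List String) (contains : Option String) (header : Option String) (last : Int) (out : String) : Decidable (Spec_pick_entry entries contains header last out) := by unfold Spec_pick_entry; infer_instance

-- ===== CLAIM (what is proved, stated in full; the proofs are below) =====
def Claim_equal_pick_entry : Prop := ∀ (entries : List String) (contains : Option String) (header : Option String) (last : Int), Dom_pick_entry entries contains header last → Pre_pick_entry entries contains header last → Spec_pick_entry entries contains header last (pick_entry entries contains header last)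
-- ===== LEMMAS AND PROOFS =====

-- the first match of the reversed list is the last element of the filtered list
lemma find?_eq_head?_filter' {α : Type} (p : α → Bool) (l : List α) :
    l.find? p = (l.filter p).head? := by
  induction l with
  | nil => rfl
  | cons a t ih =>
    by_cases h : p a = true
    · rw [List.find?_cons_of_pos h, List.filter_cons_of_pos h, List.head?_cons]
    · rw [List.find?_cons_of_neg h, List.filter_cons_of_neg h, ih]

lemma find?_reverse_eq_getLast?_filter {α : Type} (p : α → Bool) (l : List α) :
    l.reverse.find? p = (l.filter p).getLast? := by
  rw [find?_eq_head?_filter', List.filter_reverse, List.head?_reverse]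

-- the last of a nonempty suffix of l is the last of l
lemma getLast?_drop_of_lt {α : Type} (l : List α) (k : Nat) (h : k < l.length) :
    (l.drop k).getLast? = l.getLast? := by
  rw [List.getLast?_drop]
  simp
  omega

theorem pick_entry_spec_aux (entries : List String) (contains : Option String) (header : Option String) (last : Int)
    (hpre : Pre_pick_entry entries contains header last) :
    pick_entry entries contains header last = pick_entry_alt entries contains header last := by
  unfold Pre_pick_entry at hpre
  by_cases hh : pvTruthy header = true
  · unfold pick_entry pick_entry_alt
    rw [if_pos hh, if_pos hh]
    rw [PySem.List.foldl_append_if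
          (fun entry => PySem.Str.isIn (header.getD "") (pvFirstLine entry)) (fun e => e) entries []]
    rw [find?_reverse_eq_getLast?_filter]
    simp only [List.nil_append, List.map_id_fun', id_eq]
    rcases h : (entries.filter (fun entry => PySem.Str.isIn (header.getD "") (pvFirstLine entry))).getLast? with _ | e
    · rw [if_pos (List.getLast?_eq_none_iff.mp h)]
    · have hne : entries.filter (fun entry => PySem.Str.isIn (header.getD "") (pvFirstLine entry)) ≠ [] := by
        intro h0; rw [h0] at h; simp at h
      rw [if_neg hne, PySem.List.pyGet?_neg_one, h]
      rfl
  · by_cases hc : pvTruthy contains = true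
    · simp only [pick_entry, pick_entry_alt, hh, hc, if_true, if_false, Bool.false_eq_true]
      rw [find?_reverse_eq_getLast?_filter]
      rcases h : (entries.filter (fun entry => PySem.Str.isIn (contains.getD "") entry)).getLast? with _ | e
      · rw [if_pos (List.getLast?_eq_none_iff.mp h)]
      · have hne : entries.filter (fun entry => PySem.Str.isIn (contains.getD "") entry) ≠ [] := by
          intro h0; rw [h0] at h; simp at h
        rw [if_neg hne, PySem.List.pyGet?_neg_one, h]
        rfl
    · simp only [hh, hc, if_false, Bool.false_eq_true] at hpre
      obtain ⟨hne, hlast⟩ := hpre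
      simp only [pick_entry, pick_entry_alt, hh, hc, hne, if_false, Bool.false_eq_true]
      have h0 : (0 : Int) ≤ max 0 ((entries.length : Int) - last) := le_max_left _ _
      rw [PySem.List.slice_from _ h0, PySem.List.pyGet?_neg_one]
      have hlt : (max 0 ((entries.length : Int) - last)).toNat < entries.length := by
        have : entries.length ≠ 0 := by simpa [List.length_eq_zero_iff] using hne
        omega
      rw [getLast?_drop_of_lt _ _ hlt]
      rcases h : entries.getLast? with _ | e
      · exact absurd (List.getLast?_eq_none_iff.mp h) hne
      · rfl

-- ===== VERDICT (by name: the statement is the Claim_ definition above) =====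
theorem pick_entry_spec : Claim_equal_pick_entry := by
  intro entries contains header last _ hpre
  exact pick_entry_spec_aux entries contains header last hpre
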